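-- pv_equiv track=rewrite | github.com/paiml/depyler | examples/test_functools_module.py | pipeline
-- ===== SOURCE A (Python) =====
-- from typing import List, Callable
--
-- def pipeline(value: int, operations: List[str]) -> int:
--     """Test function pipeline pattern"""
--     result: int = value
--
--     for op in operations:
--         if op == "double":
--             result = result * 2
--         elif op == "increment":
--             result = result + 1
--         elif op == "square":
--             result = result * result
--
--     return result
-- ===== SOURCE B (Python) =====
-- def pipeline(value, operations):
--     # Stage 1: compress the op list into affine maps x -> a*x + b between 'square's.
--     # 'double' and 'increment' are affine and compose affinely; unknown ops are identity.
--     maps = []          # one (a, b) per segment that is followed by a square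
--     a, b = 1, 0        # affine map of the trailing segment
--     for op in operations:
--         if op == "square":
--             maps.append((a, b))
--             a, b = 1, 0
--         elif op == "double":
--             a, b = 2 * a, 2 * b
--         elif op == "increment":
--             b = b + 1
--     # Stage 2: evaluate — affine map, then square, for each compressed segment.
--     v = value
--     for p, q in maps:
--         r = p * v + q
--         v = r * r
--     return a * v + b
-- ===== Notes on version B (the rewrite author's own statement) =====
-- stated objective: alternative
-- what changed: B first compresses the operation list algebraically into affine maps x->a*x+b separated at each 'square' (double/increment compose affinely, unknown ops are identity), then a second staged pass evaluates affine-then-square per segment, instead of A's per-operation value update loop.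
import Mathlib
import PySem

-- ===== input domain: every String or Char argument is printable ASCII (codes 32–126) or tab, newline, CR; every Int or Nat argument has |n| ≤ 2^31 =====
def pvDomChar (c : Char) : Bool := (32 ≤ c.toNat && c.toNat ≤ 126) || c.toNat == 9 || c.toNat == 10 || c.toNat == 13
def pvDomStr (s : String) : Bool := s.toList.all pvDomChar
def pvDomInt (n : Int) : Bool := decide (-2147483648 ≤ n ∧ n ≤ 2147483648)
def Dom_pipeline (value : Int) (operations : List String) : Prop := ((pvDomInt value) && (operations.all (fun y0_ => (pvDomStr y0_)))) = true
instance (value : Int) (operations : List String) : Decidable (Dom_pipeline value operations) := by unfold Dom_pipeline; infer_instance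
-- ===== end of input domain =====

-- B compresses the ops into affine maps (a,b) split at each 'square', then evaluates in a second staged pass; same values as A.
-- ===== PORT A =====
def pipeline (value : Int) (operations : List String) : Int :=
  operations.foldl (fun result op =>
    if op == "double" then result * 2
    else if op == "increment" then result + 1
    else if op == "square" then result * result
    else result) value

-- ===== PORT B =====
-- stage-1 step: state = (maps finished by a square, current affine map (a,b))
def pipelineCompress (st : List (Int × Int) × Int × Int) (op : String) :
    List (Int × Int) × Int × Int :=
  if op == "square" then (st.1 ++ [st.2], (1, 0))
  else if op == "double" then (st.1, (2 * st.2.1, 2 * st.2.2))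
  else if op == "increment" then (st.1, (st.2.1, st.2.2 + 1))
  else st

def pipeline_alt (value : Int) (operations : List String) : Int :=
  let st := operations.foldl pipelineCompress ([], (1, 0))
  let v := st.1.foldl (fun v pq => (pq.1 * v + pq.2) * (pq.1 * v + pq.2)) value
  st.2.1 * v + st.2.2

-- ===== PRECONDITION & SPEC =====
def Spec_pipeline (value : Int) (operations : List String) (out : Int) : Prop := out = pipeline_alt value operations
instance (value : Int) (operations : List String) (out : Int) : Decidable (Spec_pipeline value operations out) := by unfold Spec_pipeline; infer_instance

-- ===== CLAIM (what is proved, stated in full; the proofs are below) =====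
def Claim_equal_pipeline : Prop := ∀ (value : Int) (operations : List String), Dom_pipeline value operations → Spec_pipeline value operations (pipeline value operations)

-- ===== LEMMAS AND PROOFS =====
-- evaluation of a stage-1 state on an initial value
def pipelineEval (st : List (Int × Int) × Int × Int) (v : Int) : Int :=
  st.2.1 * (st.1.foldl (fun v pq => (pq.1 * v + pq.2) * (pq.1 * v + pq.2)) v) + st.2.2

theorem pipelineEval_step (st : List (Int × Int) × Int × Int) (op : String) (v : Int) :
    pipelineEval (pipelineCompress st op) v =
      (if op == "double" then pipelineEval st v * 2
       else if op == "increment" then pipelineEval st v + 1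
       else if op == "square" then pipelineEval st v * pipelineEval st v
       else pipelineEval st v) := by
  unfold pipelineCompress pipelineEval
  by_cases h1 : op = "double"
  · simp [h1]; ring
  by_cases h2 : op = "increment"
  · simp [h2]; ring
  by_cases h3 : op = "square"
  · simp [h3, List.foldl_append]
  · simp [h1, h2, h3]

theorem pipeline_fold_eval (operations : List String)
    (st : List (Int × Int) × Int × Int) (v : Int) :
    pipelineEval (operations.foldl pipelineCompress st) v =
      operations.foldl (fun result op =>
        if op == "double" then result * 2
        else if op == "increment" then result + 1
        else if op == "square" then result * result
        else result) (pipelineEval st v) := by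
  induction operations generalizing st with
  | nil => rfl
  | cons op rest ih =>
      simp only [List.foldl_cons]
      rw [ih, pipelineEval_step]

-- ===== VERDICT (by name: the statement is the Claim_ definition above) =====
theorem pipeline_spec : Claim_equal_pipeline := by
  intro value operations _
  unfold Spec_pipeline pipeline pipeline_alt
  have h := pipeline_fold_eval operations ([], (1, 0)) value
  unfold pipelineEval at h
  simp only [List.foldl_nil, one_mul, add_zero] at h
  exact h.symm
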